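-- pv_equiv track=rewrite | github.com/GaloisInc/cryptol | cryptol-remote-api/python/cryptol/cryptoltypes.py | is_parenthesized
-- ===== SOURCE A (Python) =====
-- def is_parenthesized(s : str) -> bool:
--     """Returns ``True`` iff the given string has balanced parentheses and is
--        enclosed in a matching pair of parentheses.
--
--        :examples:
--
--        >>> is_parenthesized(' ((a) b )')
--        True
--        >>> is_parenthesized('(a) (b)')
--        False
--        >>> is_parenthesized('(a')
--        False
--        """
--     seen_one, depth = False, 0
--     for c in s:
--         if depth > 0:
--             if c == '(': depth += 1
--             if c == ')': depth -= 1
--         else: # depth == 0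
--             if c == '(':
--                 if not seen_one: seen_one, depth = True, 1
--                 # A new left paren after all parens have been closed means our
--                 #  string is not enclosed in a matching pair of parentheses
--                 else: return False
--             if c == ')':
--                 # A right paren with no matching left means our string does
--                 #  not have balanced parentheses
--                 return False
--     # Return True if in the end all parentheses are balanced and we've seen at
--     #  least one matching pair
--     return seen_one and depth == 0
-- ===== SOURCE B (Python) =====
-- def _after_open(s):
--     """Return the substring after the first '(' ; None if a ')' comes first or there is no '('."""
--     for i, c in enumerate(s):
--         if c == '(':
--             return s[i+1:]
--         if c == ')':
--             return None
--     return None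
--
-- def _after_matching_close(s):
--     """Scan with a depth counter (starting at 1); return the substring after the
--     matching ')' that brings depth to 0, or None if it never closes."""
--     depth = 1
--     for i, c in enumerate(s):
--         if c == '(':
--             depth += 1
--         elif c == ')':
--             depth -= 1
--             if depth == 0:
--                 return s[i+1:]
--     return None
--
-- def is_parenthesized(s: str) -> bool:
--     rest = _after_open(s)
--     if rest is None:
--         return False
--     tail = _after_matching_close(rest)
--     if tail is None:
--         return False
--     return all(c != '(' and c != ')' for c in tail)
-- ===== Notes on version B (the rewrite author's own statement) =====
-- stated objective: alternative
-- what changed: Replaced A's single flag-driven state-machine pass with a three-phase decomposition: locate the first '(' (rejecting an earlier ')'), find its matching ')' with a depth counter, then check the tail is paren-free.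
import Mathlib
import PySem

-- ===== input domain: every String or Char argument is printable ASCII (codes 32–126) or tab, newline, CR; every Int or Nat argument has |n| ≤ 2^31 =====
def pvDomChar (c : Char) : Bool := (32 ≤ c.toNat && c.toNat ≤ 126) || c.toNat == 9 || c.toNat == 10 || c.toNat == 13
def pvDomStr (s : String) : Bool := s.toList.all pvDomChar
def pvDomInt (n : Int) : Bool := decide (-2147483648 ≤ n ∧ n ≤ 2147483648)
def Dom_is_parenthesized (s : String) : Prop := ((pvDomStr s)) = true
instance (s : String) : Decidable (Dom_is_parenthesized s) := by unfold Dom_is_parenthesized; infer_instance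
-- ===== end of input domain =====

-- B replaces A's single flag-driven pass by a three-phase decomposition (locate open,
-- find matching close, verify paren-free tail); same O(n) cost, different structure.

-- ===== PORT A =====
-- A's loop over the characters with state (seen_one, depth); early 'return False' is a
-- direct 'false' result of the recursion.
def isParenLoopA : List Char → Bool → Int → Bool
  | [], seen, depth => seen && depth == 0
  | c :: cs, seen, depth =>
    if depth > 0 then
      let d1 := if c = '(' then depth + 1 else depth
      let d2 := if c = ')' then d1 - 1 else d1
      isParenLoopA cs seen d2
    else
      if c = '(' then
        if !seen then isParenLoopA cs true 1 else false
      else if c = ')' then false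
      else isParenLoopA cs seen depth

def is_parenthesized (s : String) : Bool := isParenLoopA s.toList false 0

-- ===== PORT B =====
-- phase 1: characters after the first '('; none if ')' comes first or no '('
def afterOpen : List Char → Option (List Char)
  | [] => none
  | c :: cs => if c = '(' then some cs else if c = ')' then none else afterOpen cs

-- phase 2: depth counter starting at 1; characters after the matching ')', none if never closes
def afterMatchingClose : List Char → Int → Option (List Char)
  | [], _ => none
  | c :: cs, depth =>
    if c = '(' then afterMatchingClose cs (depth + 1)
    else if c = ')' then
      if depth - 1 = 0 then some cs else afterMatchingClose cs (depth - 1)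
    else afterMatchingClose cs depth

def is_parenthesized_alt (s : String) : Bool :=
  match afterOpen s.toList with
  | none => false
  | some rest =>
    match afterMatchingClose rest 1 with
    | none => false
    | some tail => tail.all (fun c => c ≠ '(' && c ≠ ')')

-- ===== PRECONDITION & SPEC =====
def Spec_is_parenthesized (s : String) (out : Bool) : Prop := out = is_parenthesized_alt s
instance (s : String) (out : Bool) : Decidable (Spec_is_parenthesized s out) := by unfold Spec_is_parenthesized; infer_instance

-- ===== CLAIM (what is proved, stated in full; the proofs are below) =====
def Claim_equal_is_parenthesized : Prop := ∀ (s : String), Dom_is_parenthesized s → Spec_is_parenthesized s (is_parenthesized s)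

-- ===== LEMMAS AND PROOFS =====

-- phase 3 vs A's loop at depth 0 with seen_one set
theorem loopA_tail (cs : List Char) :
    isParenLoopA cs true 0 = cs.all (fun c => c ≠ '(' && c ≠ ')') := by
  induction cs with
  | nil => rfl
  | cons c cs ih =>
    by_cases h1 : c = '('
    · simp [isParenLoopA, h1]
    · by_cases h2 : c = ')'
      · simp [isParenLoopA, h2]
      · simp [isParenLoopA, h1, h2, ih]

-- phase 2 vs A's loop with depth > 0
theorem loopA_close (cs : List Char) (d : Int) (hd : 0 < d) :
    isParenLoopA cs true d =
      (match afterMatchingClose cs d with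
       | none => false
       | some tail => isParenLoopA tail true 0) := by
  induction cs generalizing d with
  | nil => simp [isParenLoopA, afterMatchingClose]; omega
  | cons c cs ih =>
    by_cases h1 : c = '('
    · simp only [isParenLoopA, afterMatchingClose, h1, if_pos hd]
      simp only [ite_true]
      exact ih (d + 1) (by omega)
    · by_cases h2 : c = ')'
      · simp only [isParenLoopA, afterMatchingClose, h2, if_pos hd, ite_true]
        by_cases h3 : d - 1 = 0
        · simp [h3]
        · simp only [if_neg h3]
          exact ih (d - 1) (by omega)
      · simp only [isParenLoopA, afterMatchingClose, h1, h2, if_pos hd, ite_false]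
        exact ih d hd

-- phase 1 vs A's loop at depth 0 before any '('
theorem loopA_open (cs : List Char) :
    isParenLoopA cs false 0 =
      (match afterOpen cs with
       | none => false
       | some rest => isParenLoopA rest true 1) := by
  induction cs with
  | nil => rfl
  | cons c cs ih =>
    by_cases h1 : c = '('
    · simp [isParenLoopA, afterOpen, h1]
    · by_cases h2 : c = ')'
      · simp [isParenLoopA, afterOpen, h2]
      · simp only [isParenLoopA, afterOpen, if_neg h1, if_neg h2]
        simpa using ih

-- ===== VERDICT (by name: the statement is the Claim_ definition above) =====
theorem is_parenthesized_spec : Claim_equal_is_parenthesized := by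
  intro s _
  unfold Spec_is_parenthesized is_parenthesized is_parenthesized_alt
  rw [loopA_open]
  cases afterOpen s.toList with
  | none => rfl
  | some rest =>
    simp only
    rw [loopA_close rest 1 (by norm_num)]
    cases afterMatchingClose rest 1 with
    | none => rfl
    | some tail => simpa using loopA_tail tail
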